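-- pv_equiv track=rewrite | github.com/CyberTaoFlow/prads | tools/nmap2prads/nmap2prads.py | parse_metadata_field
-- ===== SOURCE A (Python) =====
-- def parse_metadata_field(text: str, pos: int, key: str) -> tuple[str, int]:
--     """Parse a single nmap metadata field like p/.../ or p|...|.
--
--     Args:
--         text: The full metadata string after the regex portion.
--         pos: Current position in text.
--         key: The expected key character (e.g., 'p', 'v', 'i').
--
--     Returns:
--         Tuple of (field_value, new_position). Returns ("", pos) if the key
--         is not found at the current position.
--     """
--     search_patterns = [f" {key}/", f" {key}|"]
--     best_idx = -1
--     best_delim = None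
--
--     for pat in search_patterns:
--         idx = text.find(pat, pos)
--         if idx != -1 and (best_idx == -1 or idx < best_idx):
--             best_idx = idx
--             best_delim = pat[-1]
--
--     if best_idx == -1:
--         return "", pos
--
--     content_start = best_idx + len(f" {key}") + 1
--     close_idx = text.find(best_delim, content_start)
--     if close_idx == -1:
--         return text[content_start:].strip(), len(text)
--
--     return text[content_start:close_idx], close_idx + 1
-- ===== SOURCE B (Python) =====
-- def parse_metadata_field(text: str, pos: int, key: str) -> tuple[str, int]:
--     """Find the first ' '+key occurrence that is immediately followed by a
--     delimiter ('/' or '|'); split the remainder on that delimiter."""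
--     marker = " " + key
--     i = text.find(marker, pos)
--     while i != -1:
--         j = i + len(marker)
--         if j < len(text) and text[j] in "/|":
--             rest = text[j + 1:]
--             body, sep, _ = rest.partition(text[j])
--             if sep:
--                 return body, j + 1 + len(body) + 1
--             return rest.strip(), len(text)
--         i = text.find(marker, i + 1)
--     return "", pos
-- ===== Notes on version B (the rewrite author's own statement) =====
-- stated objective: alternative
-- what changed: Instead of running two separate substring searches (one per full pattern ' key/' and ' key|') and combining them by a min-index fold, B factors out the shared prefix: a loop of find(' '+key) calls that accepts the first occurrence followed by a delimiter character, then splits the remainder with str.partition instead of a second find plus slicing.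
import Mathlib
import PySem

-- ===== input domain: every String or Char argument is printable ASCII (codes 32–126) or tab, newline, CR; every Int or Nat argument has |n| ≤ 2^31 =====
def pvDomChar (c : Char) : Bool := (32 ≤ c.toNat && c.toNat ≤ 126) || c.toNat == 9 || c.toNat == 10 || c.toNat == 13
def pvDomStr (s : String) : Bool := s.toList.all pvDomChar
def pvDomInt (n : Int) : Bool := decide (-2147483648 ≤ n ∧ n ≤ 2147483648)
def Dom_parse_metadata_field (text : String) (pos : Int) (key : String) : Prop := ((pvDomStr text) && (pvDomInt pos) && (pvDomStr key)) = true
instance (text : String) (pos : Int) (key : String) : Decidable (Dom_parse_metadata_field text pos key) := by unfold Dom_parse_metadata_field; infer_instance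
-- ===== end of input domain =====

-- B factors out the shared prefix of A's two search patterns: a loop of find(" "+key)
-- calls accepting the first occurrence followed by '/' or '|', then str.partition on
-- the remainder (objective: alternative; equal return values).

-- ===== PORT A =====
-- literal transliteration of A: two find(pat, pos) calls folded to the minimum hit
def parse_metadata_field (text : String) (pos : Int) (key : String) : String × Int :=
  let cs := text.toList
  let ks := key.toList
  let search_patterns : List (List Char) := [' ' :: ks ++ ['/'], ' ' :: ks ++ ['|']]
  let st := search_patterns.foldl
    (fun (acc : Int × Char) pat =>
      let idx := PySem.Chars.findFrom cs pat pos
      if idx ≠ -1 ∧ (acc.1 = -1 ∨ idx < acc.1) then (idx, pat.getLastD ' ') else acc)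
    (-1, ' ')
  if st.1 = -1 then ("", pos)
  else
    let content_start : Int := st.1 + (1 + (ks.length : Int)) + 1
    let close_idx := PySem.Chars.findFrom cs [st.2] content_start
    if close_idx = -1 then
      (String.ofList (PySem.Chars.strip (PySem.Chars.slice cs (some content_start) none)), (cs.length : Int))
    else
      (String.ofList (PySem.Chars.slice cs (some content_start) (some close_idx)), close_idx + 1)

-- ===== PORT B =====
-- Source B's while-loop: q is the current find(" "+key) hit; accept it if the next char
-- is a delimiter, otherwise re-find from q+1.  fuel is only a totality guard
-- (each restart moves strictly right, so text-length + 1 steps always suffice).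
def pvFindDelim (cs marker : List Char) (fuel q : Nat) : Option (Nat × Char) :=
  match fuel with
  | 0 => none
  | fuel + 1 =>
    if h : q + marker.length < cs.length then
      if cs[q + marker.length] = '/' ∨ cs[q + marker.length] = '|' then
        some (q + marker.length, cs[q + marker.length])
      else
        if PySem.Chars.findFrom cs marker ((q + 1 : Nat) : Int) none = -1 then none
        else pvFindDelim cs marker fuel (PySem.Chars.findFrom cs marker ((q + 1 : Nat) : Int) none).toNat
    else
      if PySem.Chars.findFrom cs marker ((q + 1 : Nat) : Int) none = -1 then none
      else pvFindDelim cs marker fuel (PySem.Chars.findFrom cs marker ((q + 1 : Nat) : Int) none).toNat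

-- Source B: initial find, the loop above, then str.partition of the remainder
-- (partition ported by hand as a membership test + takeWhile: exact, since
-- partition splits at the first occurrence of the separator)
def parse_metadata_field_alt (text : String) (pos : Int) (key : String) : String × Int :=
  let cs := text.toList
  let marker := ' ' :: key.toList
  let i := PySem.Chars.findFrom cs marker pos
  if i = -1 then ("", pos)
  else
    match pvFindDelim cs marker (cs.length + 1) i.toNat with
    | none => ("", pos)
    | some (j, delim) =>
      let rest := cs.drop (j + 1)
      if delim ∈ rest then
        let body := rest.takeWhile (· ≠ delim)
        (String.ofList body, (j : Int) + 1 + (body.length : Int) + 1)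
      else
        (String.ofList (PySem.Chars.strip rest), (cs.length : Int))

-- ===== PRECONDITION & SPEC =====
def Spec_parse_metadata_field (text : String) (pos : Int) (key : String) (out : String × Int) : Prop := out = parse_metadata_field_alt text pos key
instance (text : String) (pos : Int) (key : String) (out : String × Int) : Decidable (Spec_parse_metadata_field text pos key out) := by unfold Spec_parse_metadata_field; infer_instance

-- ===== CLAIM (what is proved, stated in full; the proofs are below) =====
def Claim_equal_parse_metadata_field : Prop := ∀ (text : String) (pos : Int) (key : String), Dom_parse_metadata_field text pos key → Spec_parse_metadata_field text pos key (parse_metadata_field text pos key)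

-- ===== LEMMAS AND PROOFS =====

-- Python's find(sub, start): normalize the start index, then search from there
lemma findFrom_norm (cs sub : List Char) (pos : Int) (i : Nat)
    (hi : (i : Int) = max 0 (if pos < 0 then pos + cs.length else pos)) :
    PySem.Chars.findFrom cs sub pos none =
      if i ≤ cs.length then PySem.Chars.findFrom cs sub (i : Int) none else -1 := by
  have hst : (if pos < 0 then if pos + (cs.length:Int) < 0 then 0 else pos + (cs.length:Int) else pos) = (i:Int) := by
    split_ifs <;> omega
  simp only [PySem.Chars.findFrom, Int.toNat_natCast, List.take_length]
  rw [hst]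
  have h0 : (0:Int) ≤ (i:Int) := Int.natCast_nonneg i
  split_ifs <;> first | rfl | omega

-- a find started past the end of the string yields -1
lemma pvFindFrom_out (cs sub : List Char) (k : Nat) (hk : cs.length < k) :
    PySem.Chars.findFrom cs sub ((k : Nat) : Int) none = -1 := by
  simp only [PySem.Chars.findFrom]
  split_ifs <;> first | rfl | omega

lemma pvFindDelim_succ (cs marker : List Char) (fuel q : Nat) :
    pvFindDelim cs marker (fuel + 1) q =
      if h : q + marker.length < cs.length then
        if cs[q + marker.length] = '/' ∨ cs[q + marker.length] = '|' then
          some (q + marker.length, cs[q + marker.length])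
        else
          if PySem.Chars.findFrom cs marker ((q + 1 : Nat) : Int) none = -1 then none
          else pvFindDelim cs marker fuel (PySem.Chars.findFrom cs marker ((q + 1 : Nat) : Int) none).toNat
      else
        if PySem.Chars.findFrom cs marker ((q + 1 : Nat) : Int) none = -1 then none
        else pvFindDelim cs marker fuel (PySem.Chars.findFrom cs marker ((q + 1 : Nat) : Int) none).toNat := rfl

lemma append_singleton_prefix_iff (xs l : List Char) (d : Char) :
    (xs ++ [d]) <+: l ↔ l.take xs.length = xs ∧ l[xs.length]? = some d := by
  constructor
  · intro h
    have hlen : xs.length + 1 ≤ l.length := by simpa using h.length_le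
    have hx : l[xs.length]? = some (l[xs.length]'(by omega)) := List.getElem?_eq_getElem _
    have ht := List.prefix_iff_eq_take.mp h
    rw [List.length_append, List.length_cons, List.length_nil, List.take_succ, hx] at ht
    have h1 := List.append_inj ht.symm (by simp; omega)
    refine ⟨h1.1, ?_⟩
    rw [hx]
    have := h1.2
    simp only [Option.toList_some] at this
    exact congrArg some (List.singleton_injective this)
  · rintro ⟨h1, h2⟩
    have hlen : xs.length < l.length := by
      by_contra hc
      rw [List.getElem?_eq_none_iff.mpr (by omega)] at h2
      simp at h2
    rw [List.prefix_iff_eq_take, List.length_append, List.length_cons, List.length_nil,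
      List.take_succ, h2]
    simp [h1]

lemma infix_iff_exists_drop (sub s : List Char) : sub <:+: s ↔ ∃ j, sub <+: s.drop j := by
  rw [← PySem.Chars.isIn_iff_infix]
  exact (PySem.Chars.exists_prefix_drop_iff_isIn sub s).symm

lemma infix_drop_iff (sub cs : List Char) (i : Nat) :
    sub <:+: cs.drop i ↔ ∃ t, i ≤ t ∧ sub <+: cs.drop t := by
  rw [infix_iff_exists_drop]
  constructor
  · rintro ⟨j, hj⟩
    exact ⟨i + j, by omega, by rwa [List.drop_drop] at hj⟩
  · rintro ⟨t, ht, hp⟩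
    refine ⟨t - i, ?_⟩
    rw [List.drop_drop]
    have : i + (t - i) = t := by omega
    rwa [this]

-- the opener condition at position t, as a prefix fact about cs.drop t
lemma open_cond_iff (cs marker : List Char) (t : Nat) (d : Char)
    (h : t + marker.length < cs.length) :
    (marker ++ [d]) <+: cs.drop t ↔
      ((cs.drop t).take marker.length = marker ∧ cs[t + marker.length]'h = d) := by
  rw [append_singleton_prefix_iff, List.getElem?_drop]
  have hx : cs[t + marker.length]? = some (cs[t + marker.length]'h) := List.getElem?_eq_getElem _
  rw [hx]
  simp

lemma open_cond_out (cs marker : List Char) (t : Nat) (d : Char)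
    (h : ¬ t + marker.length < cs.length) : ¬ (marker ++ [d]) <+: cs.drop t := by
  intro hp
  have := hp.length_le
  simp [List.length_append, List.length_drop] at this
  omega

def pvOpens (cs marker : List Char) (t : Nat) : Prop :=
  (marker ++ ['/']) <+: cs.drop t ∨ (marker ++ ['|']) <+: cs.drop t

lemma singleton_prefix_iff (l : List Char) (d : Char) :
    [d] <+: l ↔ l[0]? = some d := by
  simpa using append_singleton_prefix_iff [] l d

lemma drop_singleton_prefix_iff (cs : List Char) (d : Char) (t : Nat) :
    [d] <+: cs.drop t ↔ cs[t]? = some d := by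
  rw [singleton_prefix_iff, List.getElem?_drop]
  simp

lemma mem_iff_singleton_infix (l : List Char) (d : Char) : d ∈ l ↔ [d] <:+: l := by
  constructor
  · intro h
    obtain ⟨s, t, rfl⟩ := List.append_of_mem h
    have he : s ++ d :: t = s ++ [d] ++ t := by simp
    rw [he]
    exact List.infix_append _ _ _
  · intro h
    exact h.subset (by simp)

-- the full behaviour of Source B's while-loop, given that q is a marker occurrence
lemma pvFindDelim_spec (cs marker : List Char) (fuel : Nat) :
    ∀ q : Nat, cs.length - q < fuel → marker <+: cs.drop q →
    (pvFindDelim cs marker fuel q = none ∧ ∀ t, q ≤ t → ¬ pvOpens cs marker t) ∨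
    (∃ w d, pvFindDelim cs marker fuel q = some (w + marker.length, d) ∧ q ≤ w ∧
      w + marker.length < cs.length ∧ (d = '/' ∨ d = '|') ∧
      (marker ++ [d]) <+: cs.drop w ∧
      ∀ t, q ≤ t → t < w → ¬ pvOpens cs marker t) := by
  induction fuel with
  | zero => intro q hf; omega
  | succ fuel ih =>
    intro q hf hq
    rw [pvFindDelim_succ]
    by_cases h : q + marker.length < cs.length
    · rw [dif_pos h]
      by_cases hdel : cs[q + marker.length] = '/' ∨ cs[q + marker.length] = '|'
      · rw [if_pos hdel]
        right
        refine ⟨q, cs[q + marker.length], rfl, le_rfl, h, hdel, ?_,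
          fun t h1 h2 _ => absurd h1 (by omega)⟩
        exact (open_cond_iff cs marker q _ h).mpr ⟨List.prefix_iff_eq_take.mp hq ▸ rfl, rfl⟩
      · rw [if_neg hdel]
        by_cases hr : PySem.Chars.findFrom cs marker ((q + 1 : Nat) : Int) none = -1
        · rw [if_pos hr]
          left
          refine ⟨rfl, fun t ht hop => ?_⟩
          rcases Nat.eq_or_lt_of_le ht with rfl | hlt
          · rcases hop with hp | hp
            · exact hdel (Or.inl ((open_cond_iff cs marker q '/' h).mp hp).2)
            · exact hdel (Or.inr ((open_cond_iff cs marker q '|' h).mp hp).2)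
          · have hle : q + 1 ≤ cs.length := by omega
            have hnin := (PySem.Chars.findFrom_natCast_eq_neg_one_iff cs marker (q+1) hle).mp hr
            rw [infix_drop_iff] at hnin
            push_neg at hnin
            have : ¬ marker <+: cs.drop t := hnin t (by omega)
            rcases hop with hp | hp <;>
              exact this ((List.prefix_append marker _).trans hp)
        · rw [if_neg hr]
          have hle : q + 1 ≤ cs.length := by omega
          obtain ⟨h1, h2, h3⟩ := PySem.Chars.findFrom_natCast_spec cs marker (q+1) hle hr
          set r := PySem.Chars.findFrom cs marker ((q + 1 : Nat) : Int) none with hrdef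
          have hrq : q + 1 ≤ r.toNat := by omega
          have hmid : ∀ t, q ≤ t → t < r.toNat → ¬ pvOpens cs marker t := by
            intro t ht htr hop
            rcases Nat.eq_or_lt_of_le ht with rfl | hlt
            · rcases hop with hp | hp
              · exact hdel (Or.inl ((open_cond_iff cs marker q '/' h).mp hp).2)
              · exact hdel (Or.inr ((open_cond_iff cs marker q '|' h).mp hp).2)
            · have hnp : ¬ marker <+: cs.drop t := h3 t (by omega) htr
              rcases hop with hp | hp <;>
                exact hnp ((List.prefix_append marker _).trans hp)
          rcases ih r.toNat (by omega) h2 with ⟨ha1, ha2⟩ | ⟨w, d, hb1, hb2, hb3, hb4, hb5, hb6⟩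
          · left
            refine ⟨ha1, fun t ht hop => ?_⟩
            rcases Nat.lt_or_ge t r.toNat with hlt | hge
            · exact hmid t ht hlt hop
            · exact ha2 t hge hop
          · right
            refine ⟨w, d, hb1, by omega, hb3, hb4, hb5, fun t ht htw hop => ?_⟩
            rcases Nat.lt_or_ge t r.toNat with hlt | hge
            · exact hmid t ht hlt hop
            · exact hb6 t hge htw hop
    · rw [dif_neg h]
      by_cases hr : PySem.Chars.findFrom cs marker ((q + 1 : Nat) : Int) none = -1
      · rw [if_pos hr]
        left
        refine ⟨rfl, fun t ht hop => ?_⟩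
        rcases hop with hp | hp <;>
          exact open_cond_out cs marker t _ (by omega) hp
      · rw [if_neg hr]
        have hle : q + 1 ≤ cs.length := by
          by_contra hc
          exact hr (pvFindFrom_out cs marker (q + 1) (by omega))
        obtain ⟨h1, h2, h3⟩ := PySem.Chars.findFrom_natCast_spec cs marker (q+1) hle hr
        set r := PySem.Chars.findFrom cs marker ((q + 1 : Nat) : Int) none with hrdef
        have hrq : q + 1 ≤ r.toNat := by omega
        have hmid : ∀ t, q ≤ t → t < r.toNat → ¬ pvOpens cs marker t := by
          intro t ht htr hop
          rcases Nat.eq_or_lt_of_le ht with rfl | hlt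
          · rcases hop with hp | hp <;>
              exact open_cond_out cs marker q _ (by omega) hp
          · have hnp : ¬ marker <+: cs.drop t := h3 t (by omega) htr
            rcases hop with hp | hp <;>
              exact hnp ((List.prefix_append marker _).trans hp)
        rcases ih r.toNat (by omega) h2 with ⟨ha1, ha2⟩ | ⟨w, d, hb1, hb2, hb3, hb4, hb5, hb6⟩
        · left
          refine ⟨ha1, fun t ht hop => ?_⟩
          rcases Nat.lt_or_ge t r.toNat with hlt | hge
          · exact hmid t ht hlt hop
          · exact ha2 t hge hop
        · right
          refine ⟨w, d, hb1, by omega, hb3, hb4, hb5, fun t ht htw hop => ?_⟩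
          rcases Nat.lt_or_ge t r.toNat with hlt | hge
          · exact hmid t ht hlt hop
          · exact hb6 t hge htw hop

-- initial find + loop locate exactly the least opener at or after i
lemma firstOpen_eq (cs marker : List Char) (fuel i w : Nat) (d : Char)
    (hfuel : cs.length < fuel)
    (hn : i ≤ cs.length) (hwi : i ≤ w) (hwp : (marker ++ [d]) <+: cs.drop w)
    (hdopen : pvOpens cs marker w)
    (hmin : ∀ t, i ≤ t → t < w → ¬ pvOpens cs marker t) :
    PySem.Chars.findFrom cs marker (i : Int) none ≠ -1 ∧
    pvFindDelim cs marker fuel (PySem.Chars.findFrom cs marker (i : Int) none).toNat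
      = some (w + marker.length, d) := by
  have hmw : marker <+: cs.drop w := (List.prefix_append marker _).trans hwp
  have hne : PySem.Chars.findFrom cs marker (i : Int) none ≠ -1 := by
    rw [ne_eq, PySem.Chars.findFrom_natCast_eq_neg_one_iff cs marker i hn]
    push_neg
    exact (infix_drop_iff _ _ _).mpr ⟨w, hwi, hmw⟩
  obtain ⟨hF1, hF2, hF3⟩ := PySem.Chars.findFrom_natCast_spec cs marker i hn hne
  set q := (PySem.Chars.findFrom cs marker (i : Int) none).toNat with hqdef
  have hiq : i ≤ q := by omega
  have hqw : q ≤ w := by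
    by_contra hc
    exact hF3 w hwi (by omega) hmw
  refine ⟨hne, ?_⟩
  rcases pvFindDelim_spec cs marker fuel q (by omega) hF2 with ⟨_, hall⟩ | ⟨w', d', hb1, hb2, hb3, hb4, hb5, hb6⟩
  · exact absurd hdopen (hall w hqw)
  · have hww : w' = w := by
      have hOw' : pvOpens cs marker w' := by
        rcases hb4 with rfl | rfl
        · exact Or.inl hb5
        · exact Or.inr hb5
      have n1 : ¬ w < w' := fun hc => hb6 w hqw hc hdopen
      have n2 : ¬ w' < w := fun hc => hmin w' (by omega) hc hOw'
      omega
    subst hww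
    have hdd : d' = d := by
      have e1 := ((append_singleton_prefix_iff marker (cs.drop w') d').mp hb5).2
      have e2 := ((append_singleton_prefix_iff marker (cs.drop w') d).mp hwp).2
      rw [e1] at e2
      exact Option.some.inj e2
    rw [hb1, hdd]

-- takeWhile (· ≠ d) reaches exactly the first occurrence of d
lemma takeWhile_first (l : List Char) (d : Char) (hd : d ∈ l) :
    l[(l.takeWhile (· ≠ d)).length]? = some d ∧
    ∀ t, t < (l.takeWhile (· ≠ d)).length → l[t]? ≠ some d := by
  induction l with
  | nil => simp at hd
  | cons c l' ih =>
    by_cases hc : c = d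
    · subst hc
      simp [List.takeWhile]
    · have hd' : d ∈ l' := by
        rcases List.mem_cons.mp hd with h | h
        · exact absurd h.symm hc
        · exact h
      obtain ⟨ih1, ih2⟩ := ih hd'
      have htw : (c :: l').takeWhile (· ≠ d) = c :: l'.takeWhile (· ≠ d) := by
        simp [List.takeWhile, hc]
      rw [htw]
      refine ⟨by simpa using ih1, ?_⟩
      intro t ht
      cases t with
      | zero => simpa using hc
      | succ t' =>
        simp only [List.length_cons, Nat.succ_lt_succ_iff] at ht
        simpa using ih2 t' ht

lemma takeWhile_eq_take (l : List Char) (d : Char) :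
    l.takeWhile (· ≠ d) = l.take (l.takeWhile (· ≠ d)).length :=
  List.prefix_iff_eq_take.mp (List.takeWhile_prefix _)

-- equality of the two tails once the opener (at w, with delimiter d) agrees
lemma tailB_eq (cs ks : List Char) (w : Nat) (d : Char)
    (hqm : w + (ks.length + 1) < cs.length) :
    (if PySem.Chars.findFrom cs [d] (↑w + (1 + (ks.length : Int)) + 1) = -1 then
       (String.ofList (PySem.Chars.strip
          (PySem.Chars.slice cs (some (↑w + (1 + (ks.length : Int)) + 1)) none)), (cs.length : Int))
     else
       (String.ofList (PySem.Chars.slice cs (some (↑w + (1 + (ks.length : Int)) + 1))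
          (some (PySem.Chars.findFrom cs [d] (↑w + (1 + (ks.length : Int)) + 1)))),
        PySem.Chars.findFrom cs [d] (↑w + (1 + (ks.length : Int)) + 1) + 1))
    = (if d ∈ cs.drop (w + (ks.length + 1) + 1) then
         (String.ofList ((cs.drop (w + (ks.length + 1) + 1)).takeWhile (· ≠ d)),
          ((w + (ks.length + 1) : Nat) : Int) + 1 +
            (((cs.drop (w + (ks.length + 1) + 1)).takeWhile (· ≠ d)).length : Int) + 1)
       else
         (String.ofList (PySem.Chars.strip (cs.drop (w + (ks.length + 1) + 1))), (cs.length : Int))) := by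
  have hcast : (↑w + (1 + (ks.length : Int)) + 1) = ((w + (ks.length + 1) + 1 : Nat) : Int) := by
    push_cast; ring
  set start := w + (ks.length + 1) + 1 with hstart
  have hs : start ≤ cs.length := by omega
  set rest := cs.drop start with hrest
  by_cases hmem : d ∈ rest
  · -- the delimiter occurs: find stops at start + (length of the takeWhile prefix)
    set L := (rest.takeWhile (· ≠ d)).length with hL
    obtain ⟨ht1, ht2⟩ := takeWhile_first rest d hmem
    have hfind : PySem.Chars.findFrom cs [d] ((start : Nat) : Int) none = ((start + L : Nat) : Int) := by
      have hne : PySem.Chars.findFrom cs [d] ((start : Nat) : Int) none ≠ -1 := by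
        rw [ne_eq, PySem.Chars.findFrom_natCast_eq_neg_one_iff cs [d] start hs]
        push_neg
        rw [← hrest, ← mem_iff_singleton_infix]
        exact hmem
      obtain ⟨hf1, hf2, hf3⟩ := PySem.Chars.findFrom_natCast_spec cs [d] start hs hne
      set f := PySem.Chars.findFrom cs [d] ((start : Nat) : Int) none with hf
      have hf0 : 0 ≤ f := le_trans (by omega) hf1
      have hcsL : cs[start + L]? = some d := by
        rw [← List.getElem?_drop, ← hrest]
        exact ht1
      have hr1 : f.toNat ≤ start + L := by
        by_contra hc
        exact hf3 (start + L) (by omega) (by omega)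
          ((drop_singleton_prefix_iff cs d (start + L)).mpr hcsL)
      have hr2 : ¬ f.toNat < start + L := by
        intro hc
        have hcf : cs[f.toNat]? = some d := (drop_singleton_prefix_iff cs d f.toNat).mp hf2
        refine ht2 (f.toNat - start) (by omega) ?_
        rw [hrest, List.getElem?_drop]
        have he : start + (f.toNat - start) = f.toNat := by omega
        rw [he]
        exact hcf
      omega
    rw [hcast, hfind, if_neg (by omega), if_pos hmem]
    have hLle : start + L ≤ cs.length := by
      have := ht1
      have hlen : L < rest.length := by
        by_contra hc
        rw [List.getElem?_eq_none_iff.mpr (by omega)] at this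
        simp at this
      rw [hrest, List.length_drop] at hlen
      omega
    have hsl : PySem.Chars.slice cs (some ((start : Nat) : Int)) (some ((start + L : Nat) : Int))
        = rest.takeWhile (· ≠ d) := by
      rw [PySem.Chars.slice_eq_listSlice, PySem.List.slice_natCast cs start (start + L), hrest]
      rw [takeWhile_eq_take rest d, ← hL]  -- hmm
      congr 1
      omega
    rw [hsl]
    refine Prod.ext rfl ?_
    show ((start + L : Nat) : Int) + 1 = ((w + (ks.length + 1) : Nat) : Int) + 1 + (L : Int) + 1
    push_cast
    omega
  · -- no delimiter: find yields -1, both sides strip the remainder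
    have hfind : PySem.Chars.findFrom cs [d] ((start : Nat) : Int) none = -1 := by
      rw [PySem.Chars.findFrom_natCast_eq_neg_one_iff cs [d] start hs]
      rw [← hrest, ← mem_iff_singleton_infix]
      exact hmem
    rw [hcast, hfind, if_pos rfl, if_neg hmem]
    have hsl : PySem.Chars.slice cs (some ((start : Nat) : Int)) none = cs.drop start := by
      rw [PySem.Chars.slice_eq_listSlice, PySem.List.slice_from cs (Int.natCast_nonneg start)]
      simp
    rw [hsl]

lemma foldA_case (i1 i2 : Int) (c1 c2 : Char) :
    (if i2 ≠ -1 ∧ ((if i1 ≠ -1 ∧ (True ∨ i1 < -1) then (i1, c1) else ((-1 : Int), ' ')).1 = -1 ∨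
          i2 < (if i1 ≠ -1 ∧ (True ∨ i1 < -1) then (i1, c1) else ((-1 : Int), ' ')).1) then (i2, c2)
     else if i1 ≠ -1 ∧ (True ∨ i1 < -1) then (i1, c1) else ((-1 : Int), ' '))
    = if i2 ≠ -1 ∧ (i1 = -1 ∨ i2 < i1) then (i2, c2)
      else if i1 ≠ -1 then (i1, c1) else ((-1 : Int), ' ') := by
  split_ifs <;> simp_all

-- ===== VERDICT (by name: the statement is the Claim_ definition above) =====
theorem parse_metadata_field_spec : Claim_equal_parse_metadata_field := by
  intro text pos key _
  unfold Spec_parse_metadata_field parse_metadata_field parse_metadata_field_alt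
  simp only [List.foldl_cons, List.foldl_nil]
  set cs := text.toList with hcs
  set ks := key.toList with hks
  have hL1 : (' ' :: ks ++ ['/']).getLastD ' ' = '/' := by
    show ((' ' :: ks) ++ ['/']).getLastD ' ' = '/'
    exact List.getLastD_concat
  have hL2 : (' ' :: ks ++ ['|']).getLastD ' ' = '|' := by
    show ((' ' :: ks) ++ ['|']).getLastD ' ' = '|'
    exact List.getLastD_concat
  rw [hL1, hL2]
  set i1 := PySem.Chars.findFrom cs (' ' :: ks ++ ['/']) pos with hi1
  set i2 := PySem.Chars.findFrom cs (' ' :: ks ++ ['|']) pos with hi2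
  rw [foldA_case]
  set marker := ' ' :: ks with hmk
  have hml : marker.length = ks.length + 1 := by rw [hmk]; simp
  set i : Nat := if (if pos < 0 then pos + ((cs.length : Nat) : Int) else pos) < 0 then 0
                 else (if pos < 0 then pos + ((cs.length : Nat) : Int) else pos).toNat with hid
  have him : (i : Int) = max 0 (if pos < 0 then pos + cs.length else pos) := by
    rw [hid]; split_ifs <;> omega
  have hF1 : i1 = if i ≤ cs.length then PySem.Chars.findFrom cs (' ' :: ks ++ ['/']) (i : Int) none else -1 :=
    findFrom_norm cs _ pos i him
  have hF2 : i2 = if i ≤ cs.length then PySem.Chars.findFrom cs (' ' :: ks ++ ['|']) (i : Int) none else -1 :=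
    findFrom_norm cs _ pos i him
  have hFB : PySem.Chars.findFrom cs marker pos none =
      if i ≤ cs.length then PySem.Chars.findFrom cs marker (i : Int) none else -1 :=
    findFrom_norm cs marker pos i him
  by_cases hn : i ≤ cs.length
  · -- start position within the string
    rw [if_pos hn] at hF1 hF2 hFB
    have hne1 : i1 = -1 ↔ ¬ ∃ t, i ≤ t ∧ (' ' :: ks ++ ['/']) <+: cs.drop t := by
      rw [hF1, PySem.Chars.findFrom_natCast_eq_neg_one_iff cs _ i hn, infix_drop_iff]
    have hne2 : i2 = -1 ↔ ¬ ∃ t, i ≤ t ∧ (' ' :: ks ++ ['|']) <+: cs.drop t := by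
      rw [hF2, PySem.Chars.findFrom_natCast_eq_neg_one_iff cs _ i hn, infix_drop_iff]
    have hsp1 : i1 ≠ -1 → (i : Int) ≤ i1 ∧ (' ' :: ks ++ ['/']) <+: cs.drop i1.toNat ∧
        ∀ t, i ≤ t → t < i1.toNat → ¬ (' ' :: ks ++ ['/']) <+: cs.drop t := by
      intro h
      rw [hF1] at h
      have := PySem.Chars.findFrom_natCast_spec cs (' ' :: ks ++ ['/']) i hn h
      rwa [← hF1] at this
    have hsp2 : i2 ≠ -1 → (i : Int) ≤ i2 ∧ (' ' :: ks ++ ['|']) <+: cs.drop i2.toNat ∧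
        ∀ t, i ≤ t → t < i2.toNat → ¬ (' ' :: ks ++ ['|']) <+: cs.drop t := by
      intro h
      rw [hF2] at h
      have := PySem.Chars.findFrom_natCast_spec cs (' ' :: ks ++ ['|']) i hn h
      rwa [← hF2] at this
    rw [hFB]
    by_cases h1 : i1 = -1 <;> by_cases h2 : i2 = -1
    · -- neither pattern occurs: A returns ("", pos); so does B
      have hnone : ∀ t, i ≤ t → ¬ pvOpens cs marker t := by
        intro t ht hop
        rcases hop with hp | hp
        · exact (hne1.mp h1) ⟨t, ht, hp⟩
        · exact (hne2.mp h2) ⟨t, ht, hp⟩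
      by_cases hFneg : PySem.Chars.findFrom cs marker (i : Int) none = -1
      · simp [h1, h2, hFneg]
      · obtain ⟨g1, g2, g3⟩ := PySem.Chars.findFrom_natCast_spec cs marker i hn hFneg
        rcases pvFindDelim_spec cs marker (cs.length + 1)
            (PySem.Chars.findFrom cs marker (i : Int) none).toNat (by omega) g2 with
          ⟨hnil, _⟩ | ⟨w, d, _, hb2, _, hb4, hb5, _⟩
        · simp [h1, h2, hFneg, hnil]
        · exfalso
          refine hnone w (by omega) ?_
          rcases hb4 with rfl | rfl
          · exact Or.inl hb5
          · exact Or.inr hb5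
    · -- only '|' occurs
      obtain ⟨ha1, ha2, ha3⟩ := hsp2 h2
      obtain ⟨w, hw⟩ : ∃ w : Nat, i2 = (w : Int) := ⟨i2.toNat, by omega⟩
      have hwt : i2.toNat = w := by omega
      rw [hwt] at ha2 ha3
      have hmin : ∀ t, i ≤ t → t < w → ¬ pvOpens cs marker t := by
        intro t ht htw hop
        rcases hop with hp | hp
        · exact (hne1.mp h1) ⟨t, ht, hp⟩
        · exact ha3 t ht htw hp
      obtain ⟨hNe, hDelim⟩ :=
        firstOpen_eq cs marker (cs.length + 1) i w '|' (by omega) hn (by omega) ha2 (Or.inr ha2) hmin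
      have hst : (if i2 ≠ -1 ∧ (i1 = -1 ∨ i2 < i1) then (i2, '|')
          else if i1 ≠ -1 then (i1, '/') else ((-1 : Int), ' ')) = (i2, '|') :=
        if_pos ⟨h2, Or.inl h1⟩
      simp only [hst]
      rw [if_neg h2, if_neg hNe, hDelim, hw]
      have hqm : w + (ks.length + 1) < cs.length := by
        have := ha2.length_le
        simp only [List.length_append, List.length_cons, List.length_drop] at this
        omega
      rw [hml]
      simpa using tailB_eq cs ks w '|' hqm
    · -- only '/' occurs
      obtain ⟨ha1, ha2, ha3⟩ := hsp1 h1
      obtain ⟨w, hw⟩ : ∃ w : Nat, i1 = (w : Int) := ⟨i1.toNat, by omega⟩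
      have hwt : i1.toNat = w := by omega
      rw [hwt] at ha2 ha3
      have hmin : ∀ t, i ≤ t → t < w → ¬ pvOpens cs marker t := by
        intro t ht htw hop
        rcases hop with hp | hp
        · exact ha3 t ht htw hp
        · exact (hne2.mp h2) ⟨t, ht, hp⟩
      obtain ⟨hNe, hDelim⟩ :=
        firstOpen_eq cs marker (cs.length + 1) i w '/' (by omega) hn (by omega) ha2 (Or.inl ha2) hmin
      have hst : (if i2 ≠ -1 ∧ (i1 = -1 ∨ i2 < i1) then (i2, '|')
          else if i1 ≠ -1 then (i1, '/') else ((-1 : Int), ' ')) = (i1, '/') := by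
        rw [if_neg (by simp [h2]), if_pos h1]
      simp only [hst]
      rw [if_neg h1, if_neg hNe, hDelim, hw]
      have hqm : w + (ks.length + 1) < cs.length := by
        have := ha2.length_le
        simp only [List.length_append, List.length_cons, List.length_drop] at this
        omega
      rw [hml]
      simpa using tailB_eq cs ks w '/' hqm
    · -- both occur: the earliest wins
      obtain ⟨ha1, ha2, ha3⟩ := hsp1 h1
      obtain ⟨hb1, hb2, hb3⟩ := hsp2 h2
      by_cases h12 : i2 < i1
      · obtain ⟨w, hw⟩ : ∃ w : Nat, i2 = (w : Int) := ⟨i2.toNat, by omega⟩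
        have hwt : i2.toNat = w := by omega
        rw [hwt] at hb2 hb3
        have hmin : ∀ t, i ≤ t → t < w → ¬ pvOpens cs marker t := by
          intro t ht htw hop
          rcases hop with hp | hp
          · exact ha3 t ht (by omega) hp
          · exact hb3 t ht htw hp
        obtain ⟨hNe, hDelim⟩ :=
          firstOpen_eq cs marker (cs.length + 1) i w '|' (by omega) hn (by omega) hb2 (Or.inr hb2) hmin
        have hst : (if i2 ≠ -1 ∧ (i1 = -1 ∨ i2 < i1) then (i2, '|')
            else if i1 ≠ -1 then (i1, '/') else ((-1 : Int), ' ')) = (i2, '|') :=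
          if_pos ⟨h2, Or.inr h12⟩
        simp only [hst]
        rw [if_neg h2, if_neg hNe, hDelim, hw]
        have hqm : w + (ks.length + 1) < cs.length := by
          have := hb2.length_le
          simp only [List.length_append, List.length_cons, List.length_drop] at this
          omega
        rw [hml]
        simpa using tailB_eq cs ks w '|' hqm
      · obtain ⟨w, hw⟩ : ∃ w : Nat, i1 = (w : Int) := ⟨i1.toNat, by omega⟩
        have hwt : i1.toNat = w := by omega
        rw [hwt] at ha2 ha3
        have hmin : ∀ t, i ≤ t → t < w → ¬ pvOpens cs marker t := by
          intro t ht htw hop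
          rcases hop with hp | hp
          · exact ha3 t ht htw hp
          · exact hb3 t ht (by omega) hp
        obtain ⟨hNe, hDelim⟩ :=
          firstOpen_eq cs marker (cs.length + 1) i w '/' (by omega) hn (by omega) ha2 (Or.inl ha2) hmin
        have hst : (if i2 ≠ -1 ∧ (i1 = -1 ∨ i2 < i1) then (i2, '|')
            else if i1 ≠ -1 then (i1, '/') else ((-1 : Int), ' ')) = (i1, '/') := by
          rw [if_neg (by simp [h1, h12]), if_pos h1]
        simp only [hst]
        rw [if_neg h1, if_neg hNe, hDelim, hw]
        have hqm : w + (ks.length + 1) < cs.length := by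
          have := ha2.length_le
          simp only [List.length_append, List.length_cons, List.length_drop] at this
          omega
        rw [hml]
        simpa using tailB_eq cs ks w '/' hqm
  · -- start position beyond the string: nothing is found on either side
    rw [if_neg hn] at hF1 hF2 hFB
    simp [hF1, hF2, hFB]
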